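-- pv_equiv track=rewrite | github.com/pkmntrainerfrost/tugas-2-kriptografi-dan-koding | cipher.py | productDecrypt
-- ===== SOURCE A (Python) =====
-- def preprocess(string:str):
--
--     preprocessed_string = ""
--
--     for char in string:
--
--         if char.isalpha():
--             preprocessed_string += char.upper()
--
--     return preprocessed_string
--
-- def vigenereDecrypt(ciphertext:str, key:str):
--
--     ciphertext_preprocessed = preprocess(ciphertext)
--     key_preprocessed = preprocess(key)
--
--     plaintext = ""
--     i = 0
--
--     for char in ciphertext_preprocessed:
--
--         plaintext += chr(((ord(char) - ord(key_preprocessed[i])) % 26) + ord("A"))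
--
--         i = (i + 1) % (len(key_preprocessed))
--
--     return plaintext
--
-- def productDecrypt(ciphertext:str, vigenere_key:str, transposition_key:int):
--
--     vigenere_plaintext = vigenereDecrypt(ciphertext,vigenere_key)
--
--     transposition_matrix = [["" for i in range(-(len(vigenere_plaintext) // -transposition_key))] for i in range(transposition_key)]
--     plaintext = ""
--
--     i, j = 0, 0
--     for char in vigenere_plaintext:
--
--         transposition_matrix[i][j] = char
--
--         j += 1
--
--         if j >= (len(transposition_matrix[0])):
--             j = 0
--             i += 1
--
--     for j in range(len(transposition_matrix[0])):
--
--         for i in range(transposition_key):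
--
--             plaintext += transposition_matrix[i][j]
--
--     return plaintext
-- ===== SOURCE B (Python) =====
-- def productDecrypt(ciphertext, vigenere_key, transposition_key):
--     ct = [c.upper() for c in ciphertext if c.isalpha()]
--     key = [c.upper() for c in vigenere_key if c.isalpha()]
--     s = [chr((ord(c) - ord(key[i % len(key)])) % 26 + ord("A"))
--          for i, c in enumerate(ct)]
--     cols = -(len(s) // -transposition_key)
--     out = []
--     for j in range(cols):
--         for i in range(transposition_key):
--             p = i * cols + j
--             if p < len(s):
--                 out.append(s[p])
--     return "".join(out)
-- ===== Notes on version B (the rewrite author's own statement) =====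
-- stated objective: simpler
-- what changed: B drops A's 2D matrix (row-major fill pass plus column-major read pass) and emits the transposition readout directly by index arithmetic s[i*cols+j], building the Vigenere plaintext with comprehensions instead of string-append loops. (measured ~1.8x faster at the largest size: no matrix allocation/fill, join instead of string +=)
import Mathlib
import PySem

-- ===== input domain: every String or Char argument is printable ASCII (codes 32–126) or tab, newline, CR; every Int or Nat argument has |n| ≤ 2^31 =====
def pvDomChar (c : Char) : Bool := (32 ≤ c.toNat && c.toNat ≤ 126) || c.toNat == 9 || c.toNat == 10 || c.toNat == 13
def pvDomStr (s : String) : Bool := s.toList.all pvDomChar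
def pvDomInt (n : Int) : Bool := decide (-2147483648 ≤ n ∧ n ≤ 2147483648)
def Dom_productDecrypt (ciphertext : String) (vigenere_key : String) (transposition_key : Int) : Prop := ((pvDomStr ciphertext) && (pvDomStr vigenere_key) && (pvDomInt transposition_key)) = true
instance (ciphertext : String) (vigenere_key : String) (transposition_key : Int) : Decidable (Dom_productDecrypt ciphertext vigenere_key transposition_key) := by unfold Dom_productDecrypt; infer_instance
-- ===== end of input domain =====

-- B drops A's 2D matrix (row-major fill pass + column-major read pass) and emits the transposition
-- readout directly by index arithmetic s[i*cols+j]; objective: simpler (same asymptotic cost).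

-- ===== PORT A =====
-- preprocess: keep only alphabetic chars, uppercased (string += loop)
def pvPreprocessA (s : String) : List Char :=
  s.toList.foldl (fun acc c => if PySem.Chars.isalpha c then acc ++ [PySem.Chars.upperChar c] else acc) []

-- one step of vigenereDecrypt's loop: state = (plaintext so far, running key index i)
def pvVigStepA (kp : List Char) (st : List Char × Int) (c : Char) : List Char × Int :=
  (st.1 ++ [Char.ofNat ((PySem.Int.mod ((c.toNat : Int) - ((PySem.List.pyGetD kp st.2 'A').toNat : Int)) 26) + 65).toNat],
   PySem.Int.mod (st.2 + 1) (kp.length : Int))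

def pvVigenereDecryptA (ciphertext key : String) : List Char :=
  let ctp := pvPreprocessA ciphertext
  let kp := pvPreprocessA key
  (ctp.foldl (pvVigStepA kp) ([], 0)).1

-- one step of the row-major fill loop: state = (matrix, i, j); a cell is a Python str (List Char)
def pvFillStepA (st : List (List (List Char)) × Nat × Nat) (c : Char) : List (List (List Char)) × Nat × Nat :=
  let m := st.1.set st.2.1 ((st.1.getD st.2.1 []).set st.2.2 [c])
  let j := st.2.2 + 1
  if (m.getD 0 []).length ≤ j then (m, st.2.1 + 1, 0) else (m, st.2.1, j)

def productDecrypt (ciphertext : String) (vigenere_key : String) (transposition_key : Int) : String :=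
  let vp := pvVigenereDecryptA ciphertext vigenere_key
  let cols : Int := -(PySem.Int.floordiv (vp.length : Int) (-transposition_key))
  let m0 : List (List (List Char)) := List.replicate transposition_key.toNat (List.replicate cols.toNat [])
  let m := (vp.foldl pvFillStepA (m0, 0, 0)).1
  let out := (List.range (m.getD 0 []).length).foldl (fun acc j =>
      (PySem.List.pyRange 0 transposition_key).foldl (fun acc i =>
        acc ++ ((m.getD i.toNat []).getD j [])) acc) []
  String.ofList out

-- ===== PORT B =====
def productDecrypt_alt (ciphertext : String) (vigenere_key : String) (transposition_key : Int) : String :=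
  let ct := (ciphertext.toList.filter PySem.Chars.isalpha).map PySem.Chars.upperChar
  let key := (vigenere_key.toList.filter PySem.Chars.isalpha).map PySem.Chars.upperChar
  let s := (PySem.List.enumerate ct).map (fun p =>
      Char.ofNat ((PySem.Int.mod ((p.2.toNat : Int) - ((PySem.List.pyGetD key (PySem.Int.mod p.1 (key.length : Int)) 'A').toNat : Int)) 26) + 65).toNat)
  let cols : Nat := (-(PySem.Int.floordiv (s.length : Int) (-transposition_key))).toNat
  let out := (List.range cols).foldl (fun acc j =>
      (List.range transposition_key.toNat).foldl (fun acc i =>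
        if i * cols + j < s.length then acc ++ [s.getD (i * cols + j) 'A'] else acc) acc) []
  String.ofList out

-- ===== PRECONDITION & SPEC =====
-- Pre_ excludes exactly the inputs where A raises: transposition_key < 1 (ZeroDivisionError at
-- transposition_key = 0, IndexError on the empty matrix for negative keys) and a key with no
-- alphabetic character while the ciphertext has one (IndexError in vigenereDecrypt).
def Pre_productDecrypt (ciphertext : String) (vigenere_key : String) (transposition_key : Int) : Prop :=
  1 ≤ transposition_key ∧
  (ciphertext.toList.any PySem.Chars.isalpha = true → vigenere_key.toList.any PySem.Chars.isalpha = true)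
instance (ciphertext : String) (vigenere_key : String) (transposition_key : Int) : Decidable (Pre_productDecrypt ciphertext vigenere_key transposition_key) := by unfold Pre_productDecrypt; infer_instance

def pvWitness_productDecrypt : String × String × Int := ("Attack at Dawn!", "Lemon", 3)

def Spec_productDecrypt (ciphertext : String) (vigenere_key : String) (transposition_key : Int) (out : String) : Prop := out = productDecrypt_alt ciphertext vigenere_key transposition_key
instance (ciphertext : String) (vigenere_key : String) (transposition_key : Int) (out : String) : Decidable (Spec_productDecrypt ciphertext vigenere_key transposition_key out) := by unfold Spec_productDecrypt; infer_instance

-- ===== CLAIM (what is proved, stated in full; the proofs are below) =====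
def Claim_equal_productDecrypt : Prop := ∀ (ciphertext : String) (vigenere_key : String) (transposition_key : Int), Dom_productDecrypt ciphertext vigenere_key transposition_key → Pre_productDecrypt ciphertext vigenere_key transposition_key → Spec_productDecrypt ciphertext vigenere_key transposition_key (productDecrypt ciphertext vigenere_key transposition_key)

-- ===== LEMMAS AND PROOFS =====

-- A's preprocess loop is exactly B's filter+map
theorem pvPreprocessA_eq (s : String) :
    pvPreprocessA s = (s.toList.filter PySem.Chars.isalpha).map PySem.Chars.upperChar := by
  unfold pvPreprocessA
  simpa using PySem.List.foldl_append_if PySem.Chars.isalpha PySem.Chars.upperChar s.toList []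

-- B's per-character map function (exactly the lambda in productDecrypt_alt)
def pvVigCharB (kp : List Char) (p : Int × Char) : Char :=
  Char.ofNat ((PySem.Int.mod ((p.2.toNat : Int) - ((PySem.List.pyGetD kp (PySem.Int.mod p.1 (kp.length : Int)) 'A').toNat : Int)) 26) + 65).toNat

-- invariant of A's vigenere loop: it maps B's per-character function over the enumerated input
theorem pvVigLoop (kp : List Char) (hk : kp ≠ []) (l : List Char) :
    ∀ (acc : List Char) (k : Nat),
      (l.foldl (pvVigStepA kp) (acc, ((k % kp.length : Nat) : Int))).1
        = acc ++ (PySem.List.enumerate l (k : Int)).map (pvVigCharB kp) := by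
  induction l with
  | nil => intro acc k; simp [PySem.List.enumerate]
  | cons c l ih =>
    intro acc k
    have hlen : 0 < kp.length := List.length_pos_iff.mpr hk
    have hmod : PySem.Int.mod (((k % kp.length : Nat) : Int) + 1) (kp.length : Int)
        = (((k + 1) % kp.length : Nat) : Int) := by
      have h1 : ((k % kp.length : Nat) : Int) + 1 = (((k % kp.length) + 1 : Nat) : Int) := by
        push_cast; ring
      rw [h1, PySem.Int.mod_natCast, Nat.mod_add_mod]
    have hstep : pvVigStepA kp (acc, ((k % kp.length : Nat) : Int)) c
        = (acc ++ [pvVigCharB kp ((k : Int), c)], (((k + 1) % kp.length : Nat) : Int)) := by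
      unfold pvVigStepA pvVigCharB
      rw [hmod]
      simp [PySem.Int.mod_natCast]
    rw [List.foldl_cons, hstep, PySem.List.enumerate_cons]
    have : ((k : Int) + 1) = ((k + 1 : Nat) : Int) := by push_cast; ring
    rw [this]
    rw [ih (acc ++ [pvVigCharB kp ((k : Int), c)]) (k + 1)]
    simp

-- the matrix A's fill loop has built after consuming the first k characters of s
def pvM (s : List Char) (t c k : Nat) : List (List (List Char)) :=
  (List.range t).map (fun i => (List.range c).map (fun j => if i * c + j < k then [s.getD (i * c + j) 'A'] else []))

theorem pvM_zero (s : List Char) (t c : Nat) :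
    pvM s t c 0 = List.replicate t (List.replicate c []) := by
  unfold pvM
  apply List.ext_getElem <;> simp

theorem pvM_row (s : List Char) (t c k i : Nat) (hi : i < t) :
    (pvM s t c k).getD i []
      = (List.range c).map (fun j => if i * c + j < k then [s.getD (i * c + j) 'A'] else []) := by
  unfold pvM
  exact PySem.List.getD_map_range _ _ _ _ hi

-- one fill step sends the k-matrix (cursor at k) to the (k+1)-matrix (cursor at k+1)
theorem pvFillStep_eq (s : List Char) (t c k : Nat) (hc : 0 < c) (ht : 0 < t)
    (hk : k < t * c) (x : Char) (hx : s.getD k 'A' = x) :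
    pvFillStepA (pvM s t c k, k / c, k % c) x = (pvM s t c (k + 1), (k + 1) / c, (k + 1) % c) := by
  have hi : k / c < t := (Nat.div_lt_iff_lt_mul hc).mpr hk
  have hj : k % c < c := Nat.mod_lt _ hc
  have hdm : (k / c) * c + k % c = k := by rw [Nat.mul_comm]; exact Nat.div_add_mod k c
  have hmset : (pvM s t c k).set (k / c) (((pvM s t c k).getD (k / c) []).set (k % c) [x])
      = pvM s t c (k + 1) := by
    rw [pvM_row s t c k _ hi]
    apply List.ext_getElem
    · simp [pvM]
    intro i h1 h2
    simp only [pvM, List.length_set, List.length_map, List.length_range] at h1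
    rw [List.getElem_set]
    simp only [pvM, List.getElem_map, List.getElem_range]
    split
    · next heq =>
      subst heq
      apply List.ext_getElem
      · simp
      intro j h3 h4
      simp only [List.length_set, List.length_map, List.length_range] at h3
      rw [List.getElem_set]
      simp only [List.getElem_map, List.getElem_range]
      split
      · next heq2 =>
        subst heq2
        rw [hdm]
        simp [← hx, List.getD]
      · next hne2 =>
        have hne3 : (k / c) * c + j ≠ k := by
          intro h
          apply hne2
          have : ((k / c) * c + j) % c = j := by
            rw [Nat.mul_comm (k / c) c, Nat.mul_add_mod]
            exact Nat.mod_eq_of_lt h3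
          rw [h] at this
          omega
        have hiff : ((k / c) * c + j < k) ↔ ((k / c) * c + j < k + 1) := by omega
        simp only [hiff]
    · next hne =>
      apply List.ext_getElem
      · simp
      intro j h3 h4
      simp only [List.getElem_map, List.getElem_range]
      have hne3 : i * c + j ≠ k := by
        intro h
        apply hne
        have hdiv : (i * c + j) / c = i := by
          rw [Nat.mul_comm, Nat.mul_add_div hc, Nat.div_eq_of_lt (by simpa using h3)]
          omega
        rw [← h]
        exact hdiv
      have hiff : (i * c + j < k) ↔ (i * c + j < k + 1) := by omega
      simp only [hiff]
  have hrow0len : ∀ (m : List (List (List Char))), m = pvM s t c (k + 1) →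
      (m.getD 0 []).length = c := by
    intro m hm
    rw [hm, pvM_row s t c (k + 1) 0 ht]
    simp
  unfold pvFillStepA
  simp only [hmset]
  rw [hrow0len _ rfl]
  by_cases hcase : c ≤ k % c + 1
  · have hjc : k % c + 1 = c := by omega
    have h1 : (k + 1) / c = k / c + 1 := by
      have : k + 1 = (k / c + 1) * c := by rw [Nat.add_mul, Nat.one_mul]; omega
      rw [this, Nat.mul_div_cancel _ hc]
    have h2 : (k + 1) % c = 0 := by
      have : k + 1 = (k / c + 1) * c := by rw [Nat.add_mul, Nat.one_mul]; omega
      rw [this, Nat.mul_mod_left]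
    simp [hcase, h1, h2]
  · have hjc : k % c + 1 < c := by omega
    have h1 : (k + 1) / c = k / c := by
      have hk1 : k + 1 = c * (k / c) + (k % c + 1) := by rw [Nat.mul_comm c (k / c)]; omega
      rw [hk1, Nat.mul_add_div hc, Nat.div_eq_of_lt hjc, Nat.add_zero]
    have h2 : (k + 1) % c = k % c + 1 := by
      have hk1 : k + 1 = c * (k / c) + (k % c + 1) := by rw [Nat.mul_comm c (k / c)]; omega
      rw [hk1, Nat.mul_add_mod]
      exact Nat.mod_eq_of_lt hjc
    simp [hcase, h1, h2]

-- the fill loop's invariant, over any suffix of s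
theorem pvFill (s : List Char) (t c : Nat) (hc : 0 < c) (ht : 0 < t) :
    ∀ (l : List Char) (k : Nat), k + l.length ≤ t * c → l = s.drop k →
      l.foldl pvFillStepA (pvM s t c k, k / c, k % c)
        = (pvM s t c (k + l.length), (k + l.length) / c, (k + l.length) % c) := by
  intro l
  induction l with
  | nil => intro k _ _; simp
  | cons x l ih =>
    intro k hle hdrop
    have hk : k < t * c := by rw [List.length_cons] at hle; omega
    have hx : s.getD k 'A' = x := by
      have h0 : (s.drop k)[0]? = some x := by rw [← hdrop]; rfl
      have h1 : s[k]? = some x :=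
        by simpa using (List.getElem?_drop (i := k) (j := 0) (xs := s)).symm.trans h0
      rw [List.getD_eq_getElem?_getD, h1]
      rfl
    rw [List.foldl_cons, pvFillStep_eq s t c k hc ht hk x hx]
    have := ih (k + 1) (by rw [List.length_cons] at hle; omega) (by
      rw [show l = (x :: l).tail from rfl, hdrop, List.tail_drop])
    have harg : k + 1 + l.length = k + (x :: l).length := by
      rw [List.length_cons]; omega
    rw [this, ← harg]

-- A's vigenere function equals B's enumerate-map, given the key has a letter whenever needed
theorem pvVig_eq (ct key : String)
    (halpha : ct.toList.any PySem.Chars.isalpha = true → key.toList.any PySem.Chars.isalpha = true) :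
    pvVigenereDecryptA ct key
      = (PySem.List.enumerate ((ct.toList.filter PySem.Chars.isalpha).map PySem.Chars.upperChar)).map
          (pvVigCharB ((key.toList.filter PySem.Chars.isalpha).map PySem.Chars.upperChar)) := by
  unfold pvVigenereDecryptA
  rw [pvPreprocessA_eq, pvPreprocessA_eq]
  by_cases hc : ct.toList.filter PySem.Chars.isalpha = []
  · simp [hc]
  · have hany : ct.toList.any PySem.Chars.isalpha = true := by
      rw [List.any_eq_true]
      obtain ⟨x, hx⟩ := List.exists_mem_of_ne_nil _ hc
      exact ⟨x, List.mem_of_mem_filter hx, List.of_mem_filter hx⟩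
    have hkey := halpha hany
    rw [List.any_eq_true] at hkey
    obtain ⟨y, hy, hya⟩ := hkey
    have hkp : (key.toList.filter PySem.Chars.isalpha).map PySem.Chars.upperChar ≠ [] := by
      simp only [ne_eq, List.map_eq_nil_iff, List.filter_eq_nil_iff]
      intro h
      exact absurd hya (by simpa using h y hy)
    have h := pvVigLoop _ hkp ((ct.toList.filter PySem.Chars.isalpha).map PySem.Chars.upperChar) [] 0
    simpa using h

-- the column-major readout of the filled matrix is B's direct index readout
theorem pvRead (s : List Char) (t c : Nat) :
    ((List.range c).foldl (fun acc j => ((List.range t).map (fun k : Nat => (k : Int))).foldl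
        (fun acc i => acc ++ (((pvM s t c s.length).getD i.toNat []).getD j [])) acc) [])
    = (List.range c).foldl (fun acc j => (List.range t).foldl
        (fun acc i => if i * c + j < s.length then acc ++ [s.getD (i * c + j) 'A'] else acc) acc) [] := by
  apply PySem.List.foldl_congr_mem
  intro acc j hj
  rw [List.foldl_map]
  apply PySem.List.foldl_congr_mem
  intro acc2 i hi
  simp only [Int.toNat_natCast]
  rw [pvM_row s t c _ i (List.mem_range.mp hi),
      PySem.List.getD_map_range _ _ _ _ (List.mem_range.mp hj)]
  split <;> simp

theorem productDecrypt_spec : Claim_equal_productDecrypt := by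
  unfold Claim_equal_productDecrypt
  intro ct key tk _hdom hpre
  obtain ⟨htk, halpha⟩ := hpre
  simp only [Spec_productDecrypt, productDecrypt, productDecrypt_alt]
  have hrw : pvVigenereDecryptA ct key
      = (PySem.List.enumerate ((ct.toList.filter PySem.Chars.isalpha).map PySem.Chars.upperChar)).map
          (fun p => Char.ofNat ((PySem.Int.mod ((p.2.toNat : Int) - ((PySem.List.pyGetD ((key.toList.filter PySem.Chars.isalpha).map PySem.Chars.upperChar) (PySem.Int.mod p.1 (((key.toList.filter PySem.Chars.isalpha).map PySem.Chars.upperChar).length : Int)) 'A').toNat : Int)) 26) + 65).toNat) :=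
    pvVig_eq ct key halpha
  rw [← hrw]
  generalize pvVigenereDecryptA ct key = s
  have ht0 : 0 < tk.toNat := by omega
  have htk' : (tk.toNat : Int) = tk := Int.toNat_of_nonneg (by omega)
  set q : Int := -(PySem.Int.floordiv (s.length : Int) (-tk)) with hq
  have hqb : (q - 1) * tk < (s.length : Int) ∧ (s.length : Int) ≤ q * tk := by
    have h1 : PySem.Int.floordiv ((s.length : Int)) (-tk) = PySem.Int.floordiv (-(s.length : Int)) tk := by
      rw [← PySem.Int.floordiv_neg_neg (-(s.length : Int)) tk, neg_neg]
    have : -PySem.Int.floordiv (-(s.length : Int)) tk = q := by rw [hq, h1]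
    exact (PySem.Int.neg_floordiv_neg_eq_iff_of_pos (by omega)).mp this
  have hq0 : 0 ≤ q := by
    by_contra h
    push Not at h
    have h2 : q * tk < 0 := mul_neg_of_neg_of_pos h (by omega)
    have h3 : (0 : Int) ≤ (s.length : Int) := Int.natCast_nonneg _
    omega
  have hcast : (q.toNat : Int) = q := Int.toNat_of_nonneg hq0
  have hnle : s.length ≤ tk.toNat * q.toNat := by
    have h1 : ((s.length : Nat) : Int) ≤ ((tk.toNat * q.toNat : Nat) : Int) := by
      push_cast
      rw [htk', hcast]
      calc (s.length : Int) ≤ q * tk := hqb.2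
        _ = tk * q := by ring
    exact_mod_cast h1
  by_cases hc0 : q.toNat = 0
  · have hlen0 : s.length = 0 := by rw [hc0, Nat.mul_zero] at hnle; omega
    have hs0 : s = [] := List.length_eq_zero_iff.mp hlen0
    subst hs0
    simp [hc0, List.getD_eq_getElem?_getD, List.getElem?_replicate, ht0]
  · have hcpos : 0 < q.toNat := Nat.pos_of_ne_zero hc0
    have hfill := pvFill s tk.toNat q.toNat hcpos ht0 s 0 (by simpa using hnle) (by simp)
    rw [Nat.zero_div, Nat.zero_mod, Nat.zero_add] at hfill
    rw [show (List.replicate tk.toNat (List.replicate q.toNat ([] : List Char)) : List (List (List Char)))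
        = pvM s tk.toNat q.toNat 0 from (pvM_zero s tk.toNat q.toNat).symm]
    rw [hfill]
    rw [show (pvM s tk.toNat q.toNat s.length, s.length / q.toNat, s.length % q.toNat).1
        = pvM s tk.toNat q.toNat s.length from rfl]
    rw [pvM_row s tk.toNat q.toNat s.length 0 ht0]
    rw [List.length_map, List.length_range]
    rw [← htk', PySem.List.pyRange_zero_natCast]
    exact congrArg _ (pvRead s tk.toNat q.toNat)
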